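-- pv_equiv track=rewrite | github.com/bneradt/toy | adventofcode/2024/2/reactor_safety_counter.py | is_safe_after_dampening
-- ===== SOURCE A (Python) =====
-- from typing import List
--
-- def is_safe(levels: List[int]) -> bool:
--     '''Return whether the report is safe.
--
--     :params levels: The levels to analyze.
--     :return: True if it is safe, false otherwise.
--     :examples:
--
--     # Must have at least two values.
--     >>> is_safe([])
--     False
--     >>> is_safe([1])
--     False
--
--     >>> is_safe([7, 6, 4, 2, 1])
--     True
--     >>> is_safe([1, 2, 7, 8, 9])
--     False
--     >>> is_safe([9, 7, 6, 2, 1])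
--     False
--     >>> is_safe([1, 3, 2, 4, 5])
--     False
--     >>> is_safe([8, 6, 4, 4, 1])
--     False
--     >>> is_safe([1, 3, 6, 7, 9])
--     True
--     '''
--     if len(levels) < 2:
--         return False
--     last_level = None
--     is_first_comparison = True
--     is_increasing = False
--     for this_level in levels:
--         if last_level is None:
--             last_level = this_level
--             continue
--
--         if last_level == this_level:
--             return False
--
--         if is_first_comparison:
--             is_first_comparison = False
--             if last_level > this_level:
--                 is_increasing = False
--             else:
--                 is_increasing = True
--
--         if is_increasing:
--             if last_level > this_level:
--                 return False
--             difference = this_level - last_level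
--         else:
--             if last_level < this_level:
--                 return False
--             difference  = last_level - this_level
--
--         if difference > 3 or difference < 1:
--             return False
--         # Last thing: set last_level
--         last_level = this_level
--
--     return True
--
-- def is_safe_after_dampening(levels: List[int]) -> bool:
--     '''Apply dampening to see whether a report is safe.
--     :param levels:
--     :params levels: The levels to analyze.
--     :return: True if safe after dampening, false otherwise.
--     # Must have at least two values.
--     >>> is_safe([])
--     False
--     >>> is_safe([1])
--     False
--
--     >>> is_safe_after_dampening([7, 6, 4, 2, 1])
--     True
--     >>> is_safe_after_dampening([1, 2, 7, 8, 9])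
--     False
--     >>> is_safe_after_dampening([9, 7, 6, 2, 1])
--     False
--     >>> is_safe_after_dampening([1, 3, 2, 4, 5])
--     True
--     >>> is_safe_after_dampening([8, 6, 4, 4, 1])
--     True
--     >>> is_safe_after_dampening([1, 3, 6, 7, 9])
--     True
--     '''
--
--     if is_safe(levels):
--         return True
--     for i in range(len(levels)):
--         subset = levels[0:i] + levels[i+1:]
--         if is_safe(subset):
--             return True
--     return False
-- ===== SOURCE B (Python) =====
-- from typing import List
--
-- def _mono_ok(xs: List[int], lo: int, hi: int) -> bool:
--     """All consecutive differences lie in [lo, hi] and there are at least two values."""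
--     if len(xs) < 2:
--         return False
--     for k in range(len(xs) - 1):
--         d = xs[k + 1] - xs[k]
--         if d < lo or d > hi:
--             return False
--     return True
--
-- def _damp_ok(xs: List[int], lo: int, hi: int) -> bool:
--     """Safe in direction [lo, hi] after removing at most one level, in one pass:
--     only removing an endpoint of the first violating pair can help."""
--     for j in range(len(xs) - 1):
--         d = xs[j + 1] - xs[j]
--         if d < lo or d > hi:
--             return (_mono_ok(xs[:j] + xs[j + 1:], lo, hi)
--                     or _mono_ok(xs[:j + 1] + xs[j + 2:], lo, hi))
--     return len(xs) >= 2
--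
-- def is_safe_after_dampening(levels: List[int]) -> bool:
--     return _damp_ok(levels, 1, 3) or _damp_ok(levels, -3, -1)
-- ===== Notes on version B (the rewrite author's own statement) =====
-- stated objective: faster
-- what changed: Instead of retrying the full safety check on every one-element deletion, B scans once per direction for the first violating pair and tests only the two deletions at that pair (removing any other index leaves the violating pair adjacent).
import Mathlib
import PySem

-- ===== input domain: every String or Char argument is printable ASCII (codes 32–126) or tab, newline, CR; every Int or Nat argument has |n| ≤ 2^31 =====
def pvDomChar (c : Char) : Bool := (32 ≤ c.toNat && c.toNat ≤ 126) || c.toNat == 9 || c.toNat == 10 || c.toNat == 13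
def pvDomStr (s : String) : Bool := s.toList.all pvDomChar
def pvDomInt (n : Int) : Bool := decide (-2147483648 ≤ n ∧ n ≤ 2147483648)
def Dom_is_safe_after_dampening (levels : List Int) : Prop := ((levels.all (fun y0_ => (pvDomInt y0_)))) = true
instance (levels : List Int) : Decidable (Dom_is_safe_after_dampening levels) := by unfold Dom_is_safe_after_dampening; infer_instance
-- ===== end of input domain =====

-- B replaces A's "retry the full safety check after deleting each index" (O(n^2)) by one scan per
-- direction that finds the first violating pair and tests only the two deletions at that pair (O(n)).


-- ===== PORT A =====
-- A's is_safe: the for-loop becomes structural recursion over the list with the same state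
-- (last_level : Option Int, is_first_comparison, is_increasing); early returns become results.
def isSafeLoop : List Int → Option Int → Bool → Bool → Bool
  | [], _, _, _ => true
  | t :: rs, none, isFirst, isInc => isSafeLoop rs (some t) isFirst isInc
  | t :: rs, some l, isFirst, isInc =>
    if l = t then false
    else
      let isFirst' := if isFirst then false else isFirst
      let isInc' := if isFirst then (if l > t then false else true) else isInc
      if isInc' then
        if l > t then false
        else if t - l > 3 ∨ t - l < 1 then false
        else isSafeLoop rs (some t) isFirst' isInc'
      else
        if l < t then false
        else if l - t > 3 ∨ l - t < 1 then false
        else isSafeLoop rs (some t) isFirst' isInc'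

def is_safe (levels : List Int) : Bool :=
  if levels.length < 2 then false else isSafeLoop levels none true false

-- Python's slices levels[0:i] + levels[i+1:] have nonnegative in-range bounds here,
-- so take/drop is exact; the for-loop with early `return True` is `any` over range(len).
def is_safe_after_dampening (levels : List Int) : Bool :=
  if is_safe levels then true
  else (List.range levels.length).any fun i =>
    is_safe (levels.take i ++ levels.drop (i + 1))

-- ===== PORT B =====
-- Source B's _mono_ok: length guard, then the pair scan as recursion carrying the previous element.
def monoRest (lo hi prev : Int) : List Int → Bool
  | [] => true
  | x :: rs => if x - prev < lo ∨ x - prev > hi then false else monoRest lo hi x rs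

def mono_ok (xs : List Int) (lo hi : Int) : Bool :=
  match xs with
  | a :: b :: rs => monoRest lo hi a (b :: rs)
  | _ => false

-- Source B's _damp_ok: `for j in range(len(xs)-1)` becomes recursion over the list of indices;
-- xs.getD is exact here since every j the loop visits is in range.
def dampLoop (xs : List Int) (lo hi : Int) : List Nat → Bool
  | [] => decide (2 ≤ xs.length)
  | j :: js =>
    let d := xs.getD (j + 1) 0 - xs.getD j 0
    if d < lo ∨ d > hi then
      mono_ok (xs.take j ++ xs.drop (j + 1)) lo hi ||
      mono_ok (xs.take (j + 1) ++ xs.drop (j + 2)) lo hi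
    else dampLoop xs lo hi js

def damp_ok (xs : List Int) (lo hi : Int) : Bool :=
  dampLoop xs lo hi (List.range (xs.length - 1))

def is_safe_after_dampening_alt (levels : List Int) : Bool :=
  damp_ok levels 1 3 || damp_ok levels (-3) (-1)

-- ===== PRECONDITION & SPEC =====
def Spec_is_safe_after_dampening (levels : List Int) (out : Bool) : Prop := out = is_safe_after_dampening_alt levels
instance (levels : List Int) (out : Bool) : Decidable (Spec_is_safe_after_dampening levels out) := by unfold Spec_is_safe_after_dampening; infer_instance

-- ===== CLAIM (what is proved, stated in full; the proofs are below) =====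
def Claim_equal_is_safe_after_dampening : Prop := ∀ (levels : List Int), Dom_is_safe_after_dampening levels → Spec_is_safe_after_dampening levels (is_safe_after_dampening levels)

-- ===== LEMMAS AND PROOFS =====

-- the list with index i removed
def rmAt (xs : List Int) (i : Nat) : List Int := xs.take i ++ xs.drop (i + 1)

-- every consecutive difference lies in [lo, hi]
def GoodAll (xs : List Int) (lo hi : Int) : Prop :=
  ∀ k, (h : k + 1 < xs.length) → lo ≤ xs[k + 1] - xs[k] ∧ xs[k + 1] - xs[k] ≤ hi

theorem monoRest_iff (lo hi : Int) (xs : List Int) : ∀ p,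
    monoRest lo hi p xs = true ↔ GoodAll (p :: xs) lo hi := by
  induction xs with
  | nil =>
    intro p
    simp [monoRest, GoodAll]
  | cons x rs ih =>
    intro p
    simp only [monoRest]
    split_ifs with hd
    · simp only [false_iff]
      intro hg
      have h0 := hg 0 (by simp)
      simp only [List.getElem_cons_succ, List.getElem_cons_zero] at h0
      omega
    · rw [ih x]
      constructor
      · intro hg k hk
        match k with
        | 0 =>
          simp only [List.getElem_cons_succ, List.getElem_cons_zero]
          omega
        | k + 1 =>
          have := hg k (by simpa using hk)
          simpa using this
      · intro hg k hk
        have := hg (k + 1) (by simpa using hk)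
        simpa using this

theorem mono_ok_iff (xs : List Int) (lo hi : Int) :
    mono_ok xs lo hi = true ↔ 2 ≤ xs.length ∧ GoodAll xs lo hi := by
  match xs with
  | [] => simp [mono_ok, GoodAll]
  | [a] => simp [mono_ok, GoodAll]
  | a :: b :: rs =>
    rw [mono_ok, monoRest_iff]
    simp [List.length_cons]

theorem length_rmAt (xs : List Int) (i : Nat) (h : i < xs.length) :
    (rmAt xs i).length = xs.length - 1 := by
  simp [rmAt]; omega

theorem getElem_rmAt_lt (xs : List Int) (i k : Nat) (hk : k < i) (h : k < (rmAt xs i).length)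
    (hx : k < xs.length) : (rmAt xs i)[k] = xs[k] := by
  have ht : k < (xs.take i).length := by
    simp only [List.length_take]
    have : i < xs.length ∨ xs.length ≤ i := by omega
    rcases this with h1 | h1 <;> simp <;> omega
  simp only [rmAt]
  rw [List.getElem_append_left ht, List.getElem_take]

theorem getElem_rmAt_ge (xs : List Int) (i k : Nat) (hk : i ≤ k) (h : k < (rmAt xs i).length)
    (hx : k + 1 < xs.length) : (rmAt xs i)[k] = xs[k + 1] := by
  have hti : (xs.take i).length = i := by
    simp only [List.length_take]; omega
  have ht : (xs.take i).length ≤ k := by omega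
  simp only [rmAt]
  rw [List.getElem_append_right ht, List.getElem_drop]
  congr 1
  omega

theorem notMono_rmAt (xs : List Int) (lo hi : Int) (j i : Nat) (hj : j + 1 < xs.length)
    (hbad : ¬ (lo ≤ xs[j + 1] - xs[j] ∧ xs[j + 1] - xs[j] ≤ hi))
    (hi1 : i < xs.length) (hij : i ≠ j) (hij1 : i ≠ j + 1) :
    mono_ok (rmAt xs i) lo hi = false := by
  have hne : ¬ (mono_ok (rmAt xs i) lo hi = true) := by
    rw [mono_ok_iff]
    rintro ⟨hlen, hg⟩
    have hlr : (rmAt xs i).length = xs.length - 1 := length_rmAt xs i hi1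
    rcases Nat.lt_or_ge i j with hcase | hcase
    · obtain ⟨m, rfl⟩ : ∃ m, j = m + 1 := ⟨j - 1, by omega⟩
      have hk : m + 1 < (rmAt xs i).length := by omega
      have hgm := hg m hk
      rw [getElem_rmAt_ge xs i (m + 1) (by omega) (by omega) (by omega),
          getElem_rmAt_ge xs i m (by omega) (by omega) (by omega)] at hgm
      exact hbad hgm
    · have hij2 : j + 1 < i := by omega
      have hk : j + 1 < (rmAt xs i).length := by omega
      have hgj := hg j hk
      rw [getElem_rmAt_lt xs i (j + 1) (by omega) (by omega) (by omega),
          getElem_rmAt_lt xs i j (by omega) (by omega) (by omega)] at hgj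
      exact hbad hgj
  simpa using hne

theorem dampFull_allgood (xs : List Int) (lo hi : Int) (hall : GoodAll xs lo hi) :
    (mono_ok xs lo hi || (List.range xs.length).any fun i => mono_ok (rmAt xs i) lo hi) =
      decide (2 ≤ xs.length) := by
  by_cases h2 : 2 ≤ xs.length
  · have hm : mono_ok xs lo hi = true := (mono_ok_iff _ _ _).2 ⟨h2, hall⟩
    simp [hm, h2]
  · have hm : mono_ok xs lo hi = false := by
      have : ¬ (mono_ok xs lo hi = true) := by
        rw [mono_ok_iff]; rintro ⟨h, _⟩; omega
      simpa using this
    have hrm : ∀ i ∈ List.range xs.length, mono_ok (rmAt xs i) lo hi = false := by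
      intro i hmem
      have : ¬ (mono_ok (rmAt xs i) lo hi = true) := by
        rw [mono_ok_iff]
        rintro ⟨hl, _⟩
        rw [length_rmAt xs i (List.mem_range.mp hmem)] at hl
        omega
      simpa using this
    have hany : ((List.range xs.length).any fun i => mono_ok (rmAt xs i) lo hi) = false :=
      List.any_eq_false.mpr fun i hmem => by simp [hrm i hmem]
    simp [hm, hany, h2]

theorem dampLoop_eq (xs : List Int) (lo hi : Int) : ∀ m j, j + m = xs.length - 1 →
    (∀ k, k < j → (h : k + 1 < xs.length) → lo ≤ xs[k + 1] - xs[k] ∧ xs[k + 1] - xs[k] ≤ hi) →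
    dampLoop xs lo hi (List.range' j m) =
      (mono_ok xs lo hi || (List.range xs.length).any fun i => mono_ok (rmAt xs i) lo hi) := by
  intro m
  induction m with
  | zero =>
    intro j hj hyp
    rw [List.range'_zero, dampLoop]
    have hall : GoodAll xs lo hi := fun k hk => hyp k (by omega) hk
    exact (dampFull_allgood xs lo hi hall).symm
  | succ n ihn =>
    intro j hj hyp
    have h : j + 1 < xs.length := by omega
    rw [List.range'_succ, dampLoop]
    simp only [List.getD_eq_getElem xs 0 h, List.getD_eq_getElem xs 0 (by omega : j < xs.length)]
    by_cases hbad : xs[j + 1] - xs[j] < lo ∨ xs[j + 1] - xs[j] > hi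
    · rw [if_pos hbad]
      have hbad' : ¬ (lo ≤ xs[j + 1] - xs[j] ∧ xs[j + 1] - xs[j] ≤ hi) := by
        rintro ⟨h1, h2⟩; rcases hbad with h3 | h3 <;> omega
      have hmono : mono_ok xs lo hi = false := by
        have : ¬ (mono_ok xs lo hi = true) := by
          rw [mono_ok_iff]; rintro ⟨_, hg⟩; exact hbad' (hg j h)
        simpa using this
      have hiff : ((List.range xs.length).any fun i => mono_ok (rmAt xs i) lo hi) = true ↔
          (mono_ok (rmAt xs j) lo hi || mono_ok (rmAt xs (j + 1)) lo hi) = true := by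
        simp only [List.any_eq_true, List.mem_range, Bool.or_eq_true]
        constructor
        · rintro ⟨i, hmem, hm⟩
          by_cases hij : i = j
          · subst hij; exact Or.inl hm
          by_cases hij1 : i = j + 1
          · subst hij1; exact Or.inr hm
          · rw [notMono_rmAt xs lo hi j i h hbad' hmem hij hij1] at hm
            exact absurd hm (by simp)
        · rintro (hm | hm)
          · exact ⟨j, by omega, hm⟩
          · exact ⟨j + 1, by omega, hm⟩
      have hany : ((List.range xs.length).any fun i => mono_ok (rmAt xs i) lo hi) =
          (mono_ok (rmAt xs j) lo hi || mono_ok (rmAt xs (j + 1)) lo hi) := by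
        cases hb : (mono_ok (rmAt xs j) lo hi || mono_ok (rmAt xs (j + 1)) lo hi) with
        | false =>
          refine Bool.eq_false_iff.mpr fun hc => ?_
          have h2 := hiff.mp hc
          exact absurd h2 (by simp [hb])
        | true => exact hiff.mpr hb
      rw [hmono, Bool.false_or, hany]
      rfl
    · rw [if_neg hbad]
      refine ihn (j + 1) (by omega) ?_
      intro k hk hkk
      by_cases hkj : k < j
      · exact hyp k hkj hkk
      · have hkj' : k = j := by omega
        subst hkj'
        constructor <;> omega

theorem isSafeLoop_inc (xs : List Int) : ∀ p,
    isSafeLoop xs (some p) false true = monoRest 1 3 p xs := by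
  induction xs with
  | nil => intro p; rfl
  | cons x rs ih =>
    intro p
    simp only [isSafeLoop, monoRest]
    simp only [Bool.false_eq_true, if_false, ih]
    split_ifs <;> first | rfl | omega

theorem isSafeLoop_dec (xs : List Int) : ∀ p,
    isSafeLoop xs (some p) false false = monoRest (-3) (-1) p xs := by
  induction xs with
  | nil => intro p; rfl
  | cons x rs ih =>
    intro p
    simp only [isSafeLoop, monoRest]
    simp only [Bool.false_eq_true, if_false, ih]
    split_ifs <;> first | rfl | omega

theorem is_safe_eq (xs : List Int) :
    is_safe xs = (mono_ok xs 1 3 || mono_ok xs (-3) (-1)) := by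
  match xs with
  | [] => rfl
  | [a] => rfl
  | a :: b :: rs =>
    show isSafeLoop (a :: b :: rs) none true false = _
    simp only [isSafeLoop, mono_ok, monoRest]
    simp only [if_true]
    split_ifs <;> (try simp only [Bool.or_false, Bool.false_or]) <;>
      first
        | rfl
        | omega
        | exact isSafeLoop_inc rs b
        | exact isSafeLoop_dec rs b
        | simp_all

theorem any_or_distrib (l : List Nat) (f g : Nat → Bool) :
    (l.any fun i => f i || g i) = (l.any f || l.any g) := by
  induction l with
  | nil => rfl
  | cons x xs ih =>
    simp only [List.any_cons, ih]
    cases f x <;> cases g x <;> cases xs.any f <;> cases xs.any g <;> rfl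

theorem a_side_eq (levels : List Int) : is_safe_after_dampening levels =
    ((mono_ok levels 1 3 || (List.range levels.length).any fun i => mono_ok (rmAt levels i) 1 3) ||
     (mono_ok levels (-3) (-1) ||
       (List.range levels.length).any fun i => mono_ok (rmAt levels i) (-3) (-1))) := by
  rw [is_safe_after_dampening]
  have hif : ∀ (c b : Bool), (if c = true then true else b) = (c || b) := by decide
  rw [hif]
  have hin : (fun i => is_safe (levels.take i ++ levels.drop (i + 1))) =
      fun i => mono_ok (rmAt levels i) 1 3 || mono_ok (rmAt levels i) (-3) (-1) :=
    funext fun i => is_safe_eq _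
  rw [is_safe_eq, hin, any_or_distrib]
  have hb : ∀ (m1 m2 a1 a2 : Bool), ((m1 || m2) || (a1 || a2)) = ((m1 || a1) || (m2 || a2)) := by
    decide
  exact hb _ _ _ _

-- ===== VERDICT (by name: the statement is the Claim_ definition above) =====
theorem is_safe_after_dampening_spec : Claim_equal_is_safe_after_dampening := by
  intro levels _
  unfold Spec_is_safe_after_dampening
  rw [a_side_eq]
  rw [is_safe_after_dampening_alt, damp_ok, damp_ok]
  have hr : List.range (levels.length - 1) = List.range' 0 (levels.length - 1) :=
    List.range_eq_range'
  rw [hr, dampLoop_eq levels 1 3 (levels.length - 1) 0 (by omega)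
        (fun k hk _ => absurd hk (Nat.not_lt_zero k)),
      dampLoop_eq levels (-3) (-1) (levels.length - 1) 0 (by omega)
        (fun k hk _ => absurd hk (Nat.not_lt_zero k))]
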